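-- pv_equiv track=rewrite | github.com/SohaibAamir28/M-IT-2-2025-Winter-Contest | Round1/1A.py | max_fibonacciness
-- ===== SOURCE A (Python) =====
-- def max_fibonacciness(t, test_cases):
--     results = []
--     for case in test_cases:
--         a1, a2, a4, a5 = case
--         max_fibo = 0
--
--         # Iterate over all possible values of a3
--         for a3 in range(-200, 201):  # Considering the range for potential a3 values
--             count = 0
--
--             # Check conditions for Fibonacciness
--             if a1 + a2 == a3:
--                 count += 1
--             if a2 + a3 == a4:
--                 count += 1
--             if a3 + a4 == a5:
--                 count += 1
--
--             # Update maximum Fibonacciness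
--             max_fibo = max(max_fibo, count)
--
--         results.append(max_fibo)
--
--     return results
-- ===== SOURCE B (Python) =====
-- def max_fibonacciness(t, test_cases):
--     results = []
--     for a1, a2, a4, a5 in test_cases:
--         best = 0
--         for v in (a1 + a2, a4 - a2, a5 - a4):
--             if -200 <= v <= 200:
--                 c = (a1 + a2 == v) + (a2 + v == a4) + (v + a4 == a5)
--                 if c > best:
--                     best = c
--         results.append(best)
--     return results
-- ===== Notes on version B (the rewrite author's own statement) =====
-- stated objective: faster
-- what changed: Instead of scanning all 401 values of a3 in [-200,200], B evaluates only the three candidate values a1+a2, a4-a2, a5-a4 (clamped to the range) that can make any condition true.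
import Mathlib
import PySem

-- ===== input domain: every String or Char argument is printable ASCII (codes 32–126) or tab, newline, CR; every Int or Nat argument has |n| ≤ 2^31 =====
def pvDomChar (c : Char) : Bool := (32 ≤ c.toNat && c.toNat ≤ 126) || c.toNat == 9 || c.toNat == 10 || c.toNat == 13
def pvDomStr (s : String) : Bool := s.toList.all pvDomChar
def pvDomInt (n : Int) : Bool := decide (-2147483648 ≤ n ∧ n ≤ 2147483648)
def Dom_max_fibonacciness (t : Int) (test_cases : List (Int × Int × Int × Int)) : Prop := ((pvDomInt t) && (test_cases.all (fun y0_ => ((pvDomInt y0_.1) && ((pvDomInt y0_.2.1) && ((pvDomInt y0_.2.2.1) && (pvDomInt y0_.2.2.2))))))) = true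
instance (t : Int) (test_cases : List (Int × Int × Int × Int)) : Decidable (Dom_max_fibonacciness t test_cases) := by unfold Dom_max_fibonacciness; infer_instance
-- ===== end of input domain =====

-- B replaces A's scan over all 401 values of a3 by a check of the three candidate values
-- a1+a2, a4-a2, a5-a4 (clamped to [-200,200]); objective: faster (constant factor).

-- ===== PORT A =====
def max_fibonacciness (t : Int) (test_cases : List (Int × Int × Int × Int)) : List Int :=
  test_cases.foldl (fun results case =>
    let (a1, a2, a4, a5) := case
    let max_fibo := (PySem.List.pyRange (-200) 201 1).foldl (fun max_fibo a3 =>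
      let count : Int := 0
      let count := if a1 + a2 = a3 then count + 1 else count
      let count := if a2 + a3 = a4 then count + 1 else count
      let count := if a3 + a4 = a5 then count + 1 else count
      max max_fibo count) 0
    results ++ [max_fibo]) []

-- ===== PORT B =====
def max_fibonacciness_alt (t : Int) (test_cases : List (Int × Int × Int × Int)) : List Int :=
  test_cases.foldl (fun results case =>
    let (a1, a2, a4, a5) := case
    let best := [a1 + a2, a4 - a2, a5 - a4].foldl (fun best v =>
      if -200 ≤ v ∧ v ≤ 200 then
        let c : Int := (if a1 + a2 = v then 1 else 0) + (if a2 + v = a4 then 1 else 0)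
          + (if v + a4 = a5 then 1 else 0)
        if c > best then c else best
      else best) 0
    results ++ [best]) []

-- ===== PRECONDITION & SPEC =====
def Spec_max_fibonacciness (t : Int) (test_cases : List (Int × Int × Int × Int)) (out : List Int) : Prop := out = max_fibonacciness_alt t test_cases
instance (t : Int) (test_cases : List (Int × Int × Int × Int)) (out : List Int) : Decidable (Spec_max_fibonacciness t test_cases out) := by unfold Spec_max_fibonacciness; infer_instance

-- ===== CLAIM (what is proved, stated in full; the proofs are below) =====
def Claim_equal_max_fibonacciness : Prop := ∀ (t : Int) (test_cases : List (Int × Int × Int × Int)), Dom_max_fibonacciness t test_cases → Spec_max_fibonacciness t test_cases (max_fibonacciness t test_cases)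

-- ===== LEMMAS AND PROOFS =====

-- the count of satisfied conditions for a given a3 = v
def pvCnt (a1 a2 a4 a5 v : Int) : Int :=
  (if a1 + a2 = v then 1 else 0) + (if a2 + v = a4 then 1 else 0) + (if v + a4 = a5 then 1 else 0)

-- a positive count forces v to be one of the three candidates
lemma pvCnt_pos_mem (a1 a2 a4 a5 v : Int) (h : 0 < pvCnt a1 a2 a4 a5 v) :
    v ∈ [a1 + a2, a4 - a2, a5 - a4] := by
  unfold pvCnt at h
  simp only [List.mem_cons]
  split_ifs at h <;> omega

-- generic facts about 'fold of max m (f v)'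
lemma le_foldlMax_init (f : Int → Int) (l : List Int) (b : Int) :
    b ≤ l.foldl (fun m v => max m (f v)) b := by
  induction l generalizing b with
  | nil => simp
  | cons x xs ih => exact le_trans (le_max_left b (f x)) (ih _)

lemma le_foldlMax_mem (f : Int → Int) (l : List Int) (b x : Int) (hx : x ∈ l) :
    f x ≤ l.foldl (fun m v => max m (f v)) b := by
  induction l generalizing b with
  | nil => cases hx
  | cons y ys ih =>
    rcases List.mem_cons.mp hx with rfl | h
    · exact le_trans (le_max_right b (f x)) (le_foldlMax_init f ys _)
    · exact ih _ h

lemma foldlMax_le (f : Int → Int) (l : List Int) (b K : Int) (hb : b ≤ K)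
    (h : ∀ v ∈ l, f v ≤ K) : l.foldl (fun m v => max m (f v)) b ≤ K := by
  induction l generalizing b with
  | nil => simpa
  | cons x xs ih =>
    simp only [List.foldl_cons]
    exact ih _ (max_le hb (h x List.mem_cons_self)) (fun v hv => h v (List.mem_cons_of_mem _ hv))

-- B's guarded step is 'max with g', where g clamps the count to the range
def pvG (a1 a2 a4 a5 v : Int) : Int :=
  if -200 ≤ v ∧ v ≤ 200 then pvCnt a1 a2 a4 a5 v else 0

lemma altFold_eq (a1 a2 a4 a5 : Int) (l : List Int) (b : Int) (hb : 0 ≤ b) :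
    l.foldl (fun best v =>
      if -200 ≤ v ∧ v ≤ 200 then
        let c : Int := (if a1 + a2 = v then 1 else 0) + (if a2 + v = a4 then 1 else 0)
          + (if v + a4 = a5 then 1 else 0)
        if c > best then c else best
      else best) b
    = l.foldl (fun m v => max m (pvG a1 a2 a4 a5 v)) b := by
  induction l generalizing b with
  | nil => rfl
  | cons x xs ih =>
    simp only [List.foldl_cons]
    have hstep : (if -200 ≤ x ∧ x ≤ 200 then
        let c : Int := (if a1 + a2 = x then 1 else 0) + (if a2 + x = a4 then 1 else 0)
          + (if x + a4 = a5 then 1 else 0)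
        if c > b then c else b
      else b) = max b (pvG a1 a2 a4 a5 x) := by
      unfold pvG pvCnt
      dsimp only
      rw [Int.max_def]
      split_ifs <;> omega
    rw [hstep]
    exact ih _ (le_trans hb (le_max_left _ _))

-- A's inner let-chain is pvCnt
lemma countChain_eq (a1 a2 a4 a5 m v : Int) :
    (let count : Int := 0
     let count := if a1 + a2 = v then count + 1 else count
     let count := if a2 + v = a4 then count + 1 else count
     let count := if v + a4 = a5 then count + 1 else count
     max m count) = max m (pvCnt a1 a2 a4 a5 v) := by
  unfold pvCnt
  dsimp only
  rw [Int.max_def, Int.max_def]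
  split_ifs <;> omega

-- per-case equality of the two maxima
lemma case_eq (a1 a2 a4 a5 : Int) :
    (PySem.List.pyRange (-200) 201 1).foldl (fun max_fibo a3 =>
      let count : Int := 0
      let count := if a1 + a2 = a3 then count + 1 else count
      let count := if a2 + a3 = a4 then count + 1 else count
      let count := if a3 + a4 = a5 then count + 1 else count
      max max_fibo count) 0
    = [a1 + a2, a4 - a2, a5 - a4].foldl (fun best v =>
      if -200 ≤ v ∧ v ≤ 200 then
        let c : Int := (if a1 + a2 = v then 1 else 0) + (if a2 + v = a4 then 1 else 0)
          + (if v + a4 = a5 then 1 else 0)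
        if c > best then c else best
      else best) 0 := by
  have hfun : (fun (max_fibo a3 : Int) =>
      let count : Int := 0
      let count := if a1 + a2 = a3 then count + 1 else count
      let count := if a2 + a3 = a4 then count + 1 else count
      let count := if a3 + a4 = a5 then count + 1 else count
      max max_fibo count)
    = (fun m v => max m (pvCnt a1 a2 a4 a5 v)) := by
    funext m v
    exact countChain_eq a1 a2 a4 a5 m v
  rw [hfun, altFold_eq a1 a2 a4 a5 _ 0 le_rfl]
  set fA := (PySem.List.pyRange (-200) 201 1).foldl
      (fun m v => max m (pvCnt a1 a2 a4 a5 v)) 0 with hfA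
  set fB := ([a1 + a2, a4 - a2, a5 - a4]).foldl
      (fun m v => max m (pvG a1 a2 a4 a5 v)) 0 with hfB
  have hB0 : (0:Int) ≤ fB := le_foldlMax_init _ _ _
  have hA0 : (0:Int) ≤ fA := le_foldlMax_init _ _ _
  apply le_antisymm
  · apply foldlMax_le _ _ _ _ hB0
    intro v hv
    by_cases hpos : 0 < pvCnt a1 a2 a4 a5 v
    · have hmem := pvCnt_pos_mem a1 a2 a4 a5 v hpos
      have hrange : -200 ≤ v ∧ v ≤ 200 := by
        have := (PySem.List.mem_pyRange_one (a := -200) (b := 201) (x := v)).mp hv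
        omega
      have hg : pvG a1 a2 a4 a5 v = pvCnt a1 a2 a4 a5 v := by
        unfold pvG; rw [if_pos hrange]
      rw [← hg]
      exact le_foldlMax_mem _ _ _ _ hmem
    · exact le_trans (by omega) hB0
  · apply foldlMax_le _ _ _ _ hA0
    intro v hv
    by_cases hrange : -200 ≤ v ∧ v ≤ 200
    · have hmem : v ∈ PySem.List.pyRange (-200) 201 1 :=
        (PySem.List.mem_pyRange_one (a := -200) (b := 201) (x := v)).mpr (by omega)
      have hg : pvG a1 a2 a4 a5 v = pvCnt a1 a2 a4 a5 v := by
        unfold pvG; rw [if_pos hrange]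
      rw [hg]
      exact le_foldlMax_mem _ _ _ _ hmem
    · have hg : pvG a1 a2 a4 a5 v = 0 := by unfold pvG; rw [if_neg hrange]
      rw [hg]; exact hA0

-- ===== VERDICT (by name: the statement is the Claim_ definition above) =====
theorem max_fibonacciness_spec : Claim_equal_max_fibonacciness := by
  intro t test_cases _
  unfold Spec_max_fibonacciness max_fibonacciness max_fibonacciness_alt
  rw [PySem.List.foldl_append_singleton_eq_map, PySem.List.foldl_append_singleton_eq_map]
  apply List.map_congr_left
  intro case _
  obtain ⟨a1, a2, a4, a5⟩ := case
  exact case_eq a1 a2 a4 a5
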